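-- pv_equiv track=rewrite | github.com/sacadena/adventofcode2023 | day16.py | get_cells_directions
-- ===== SOURCE A (Python) =====
-- def get_neighbors(val, point, arrow_direction):
--     row, col = point
--     neighbors = []
--     if arrow_direction == 'up':
--         if val in ('|', '.'):
--             neighbors.append((row - 1, col, 'up'))
--         elif val == '-':
--             neighbors.append((row, col - 1, 'left'))
--             neighbors.append((row, col + 1, 'right'))
--         elif val == '/':
--             neighbors.append((row, col + 1, 'right'))
--         elif val == '\\':
--             neighbors.append((row, col - 1, 'left'))
--     elif arrow_direction == 'down':
--         if val in ('|', '.'):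
--             neighbors.append((row + 1, col, 'down'))
--         elif val == '-':
--             neighbors.append((row, col - 1, 'left'))
--             neighbors.append((row, col + 1, 'right'))
--         elif val == '/':
--             neighbors.append((row, col - 1, 'left'))
--         elif val == '\\':
--             neighbors.append((row, col + 1, 'right'))
--     elif arrow_direction == 'right':
--         if val == '|':
--             neighbors.append((row - 1, col, 'up'))
--             neighbors.append((row + 1, col, 'down'))
--         elif val in ('-', '.'):
--             neighbors.append((row, col + 1, 'right'))
--         elif val == '/':
--             neighbors.append((row - 1, col, 'up'))
--         elif val == '\\':
--             neighbors.append((row + 1, col, 'down'))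
--     elif arrow_direction == 'left':
--         if val == '|':
--             neighbors.append((row - 1, col, 'up'))
--             neighbors.append((row + 1, col, 'down'))
--         elif val in ('-', '.'):
--             neighbors.append((row, col - 1, 'left'))
--         elif val == '/':
--             neighbors.append((row + 1, col, 'down'))
--         elif val == '\\':
--             neighbors.append((row - 1, col, 'up'))
--
--     return neighbors
--
-- def get_cells_directions(matrix, start_point):
--     def is_valid(point_direction):
--         row, col, direction = point_direction
--         if row < 0 or col < 0 or row >= len(matrix) or col >= len(matrix[0]):
--             return False
--         return True
--
--     table = set()
--
--     def dfs(point_direction, visited):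
--         row, col, direction = point_direction
--         if point_direction in table:
--             return
--
--         neighbors = [
--             neigh for neigh in get_neighbors(matrix[row][col], (row, col), direction)
--             if is_valid(neigh)
--         ]
--         for neighbor in neighbors:
--             if neighbor in visited:
--                 continue
--             visited.add(neighbor)
--             dfs(neighbor, visited)
--
--         table.add(point_direction)
--
--     seen = {start_point}
--     dfs(start_point, seen)
--     return seen
-- ===== SOURCE B (Python) =====
-- def get_neighbors(val, point, arrow_direction):
--     row, col = point
--     neighbors = []
--     if arrow_direction == 'up':
--         if val in ('|', '.'):
--             neighbors.append((row - 1, col, 'up'))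
--         elif val == '-':
--             neighbors.append((row, col - 1, 'left'))
--             neighbors.append((row, col + 1, 'right'))
--         elif val == '/':
--             neighbors.append((row, col + 1, 'right'))
--         elif val == '\\':
--             neighbors.append((row, col - 1, 'left'))
--     elif arrow_direction == 'down':
--         if val in ('|', '.'):
--             neighbors.append((row + 1, col, 'down'))
--         elif val == '-':
--             neighbors.append((row, col - 1, 'left'))
--             neighbors.append((row, col + 1, 'right'))
--         elif val == '/':
--             neighbors.append((row, col - 1, 'left'))
--         elif val == '\\':
--             neighbors.append((row, col + 1, 'right'))
--     elif arrow_direction == 'right':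
--         if val == '|':
--             neighbors.append((row - 1, col, 'up'))
--             neighbors.append((row + 1, col, 'down'))
--         elif val in ('-', '.'):
--             neighbors.append((row, col + 1, 'right'))
--         elif val == '/':
--             neighbors.append((row - 1, col, 'up'))
--         elif val == '\\':
--             neighbors.append((row + 1, col, 'down'))
--     elif arrow_direction == 'left':
--         if val == '|':
--             neighbors.append((row - 1, col, 'up'))
--             neighbors.append((row + 1, col, 'down'))
--         elif val in ('-', '.'):
--             neighbors.append((row, col - 1, 'left'))
--         elif val == '/':
--             neighbors.append((row + 1, col, 'down'))
--         elif val == '\\':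
--             neighbors.append((row - 1, col, 'up'))
--
--     return neighbors
--
--
-- def get_cells_directions(matrix, start_point):
--     rows = len(matrix)
--
--     def valid_neighbors(state):
--         row, col, direction = state
--         return [
--             (r, c, d)
--             for (r, c, d) in get_neighbors(matrix[row][col], (row, col), direction)
--             if 0 <= r < rows and 0 <= c < len(matrix[0])
--         ]
--
--     seen = {start_point}
--     stack = [valid_neighbors(start_point)]
--     while stack:
--         frame = stack[-1]
--         if not frame:
--             stack.pop()
--             continue
--         state = frame.pop(0)
--         if state not in seen:
--             seen.add(state)
--             stack.append(valid_neighbors(state))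
--     return seen
-- ===== Notes on version B (the rewrite author's own statement) =====
-- stated objective: alternative
-- what changed: Replaces A's recursive DFS with its redundant `table` set by an iterative explicit-stack traversal over frames of pending valid neighbors, maintaining only the `seen` set.
-- outside the precondition, e.g. on get_cells_directions([['x', '|'], ['y']], (0, 0, 'up')): A returns {(0, 0, 'up')}, B returns {(0, 0, 'up')}
import Mathlib
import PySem

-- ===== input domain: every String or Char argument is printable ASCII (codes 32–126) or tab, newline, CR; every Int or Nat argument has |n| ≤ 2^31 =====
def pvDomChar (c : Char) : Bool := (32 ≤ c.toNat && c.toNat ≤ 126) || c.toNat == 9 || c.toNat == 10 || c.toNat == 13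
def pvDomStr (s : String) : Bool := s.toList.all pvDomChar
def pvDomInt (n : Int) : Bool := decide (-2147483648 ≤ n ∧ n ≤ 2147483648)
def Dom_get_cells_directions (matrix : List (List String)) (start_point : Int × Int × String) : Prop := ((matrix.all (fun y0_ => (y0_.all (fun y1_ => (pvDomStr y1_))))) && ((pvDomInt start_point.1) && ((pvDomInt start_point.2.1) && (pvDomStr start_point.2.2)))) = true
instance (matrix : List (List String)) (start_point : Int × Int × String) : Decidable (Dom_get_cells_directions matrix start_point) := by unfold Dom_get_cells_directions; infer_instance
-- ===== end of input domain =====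

-- B replaces A's recursive DFS (with its redundant `table` set) by an explicit-stack
-- iterative DFS over neighbor frames; same returned set (equivalence is about the
-- return value; neither side mutates its arguments).

-- ===== PORT A =====
-- shared module-level helper (identical in Source A and Source B)
def get_neighbors (val : String) (point : Int × Int) (arrow_direction : String) : List (Int × Int × String) :=
  let row := point.1
  let col := point.2
  if arrow_direction = "up" then
    if val = "|" ∨ val = "." then [(row - 1, col, "up")]
    else if val = "-" then [(row, col - 1, "left"), (row, col + 1, "right")]
    else if val = "/" then [(row, col + 1, "right")]
    else if val = "\\" then [(row, col - 1, "left")]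
    else []
  else if arrow_direction = "down" then
    if val = "|" ∨ val = "." then [(row + 1, col, "down")]
    else if val = "-" then [(row, col - 1, "left"), (row, col + 1, "right")]
    else if val = "/" then [(row, col - 1, "left")]
    else if val = "\\" then [(row, col + 1, "right")]
    else []
  else if arrow_direction = "right" then
    if val = "|" then [(row - 1, col, "up"), (row + 1, col, "down")]
    else if val = "-" ∨ val = "." then [(row, col + 1, "right")]
    else if val = "/" then [(row - 1, col, "up")]
    else if val = "\\" then [(row + 1, col, "down")]
    else []
  else if arrow_direction = "left" then
    if val = "|" then [(row - 1, col, "up"), (row + 1, col, "down")]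
    else if val = "-" ∨ val = "." then [(row, col - 1, "left")]
    else if val = "/" then [(row + 1, col, "down")]
    else if val = "\\" then [(row - 1, col, "up")]
    else []
  else []

-- matrix[r][c] with Python indexing (negative wrap); none = IndexError
def pvCell (matrix : List (List String)) (r c : Int) : Option String :=
  (PySem.List.pyGet? matrix r).bind (fun row => PySem.List.pyGet? row c)

def pvRows (matrix : List (List String)) : Int := (matrix.length : Int)
-- len(matrix[0]); in Python only evaluated with matrix nonempty (guarded by headD)
def pvWidth (matrix : List (List String)) : Int := (((matrix.headD []).length : Nat) : Int)

-- A's nested is_valid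
def pvIsValid (matrix : List (List String)) (q : Int × Int × String) : Bool :=
  !(decide (q.1 < 0) || decide (q.2.1 < 0) || decide (q.1 ≥ pvRows matrix) || decide (q.2.1 ≥ pvWidth matrix))

mutual
-- A's dfs, with the mutated sets `visited`/`table` threaded; fuel only makes the
-- recursion structural (never exhausted under Pre_)
def pvDfsA (matrix : List (List String)) : Nat → (Int × Int × String) → List (Int × Int × String) → List (Int × Int × String) → List (Int × Int × String) × List (Int × Int × String)
  | 0, _, v, t => (v, t)
  | f+1, pd, v, t =>
    if PySem.Set.contains t pd then (v, t)
    else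
      match pvCell matrix pd.1 pd.2.1 with
      | none => (v, t)   -- Python raises IndexError here; excluded by Pre_
      | some val =>
        let r := pvGoA matrix f ((get_neighbors val (pd.1, pd.2.1) pd.2.2).filter (pvIsValid matrix)) v t
        (r.1, PySem.Set.add r.2 pd)
  termination_by f _ _ _ => (f, 0)
-- A's `for neighbor in neighbors` loop
def pvGoA (matrix : List (List String)) : Nat → List (Int × Int × String) → List (Int × Int × String) → List (Int × Int × String) → List (Int × Int × String) × List (Int × Int × String)
  | _, [], v, t => (v, t)
  | f, n :: rest, v, t =>
      if PySem.Set.contains v n then pvGoA matrix f rest v t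
      else
        let r := pvDfsA matrix f n (PySem.Set.add v n) t
        pvGoA matrix f rest r.1 r.2
  termination_by f ns _ _ => (f, ns.length + 1)
end

def pvFuelA (matrix : List (List String)) : Nat := matrix.length * (matrix.headD []).length * 4 + 2

def get_cells_directions (matrix : List (List String)) (start_point : Int × Int × String) : List (Int × Int × String) :=
  (pvDfsA matrix (pvFuelA matrix) start_point (PySem.Set.ofList [start_point]) PySem.Set.empty).1

-- ===== PORT B =====
-- B's valid_neighbors helper: neighbors of a state, kept when inside the grid
def pvValidNeighbors (matrix : List (List String)) (st : Int × Int × String) : List (Int × Int × String) :=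
  match pvCell matrix st.1 st.2.1 with
  | none => []   -- Python raises IndexError here; excluded by Pre_
  | some val =>
      (get_neighbors val (st.1, st.2.1) st.2.2).filter
        (fun q => decide (0 ≤ q.1) && decide (q.1 < pvRows matrix) && decide (0 ≤ q.2.1) && decide (q.2.1 < pvWidth matrix))

-- B's while loop over the stack of neighbor frames (stack top = head; frame front = head)
def pvLoopB (matrix : List (List String)) : Nat → List (List (Int × Int × String)) → List (Int × Int × String) → List (Int × Int × String)
  | 0, _, seen => seen
  | _+1, [], seen => seen
  | f+1, [] :: stk, seen => pvLoopB matrix f stk seen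
  | f+1, (n :: rest) :: stk, seen =>
      if PySem.Set.contains seen n then pvLoopB matrix f (rest :: stk) seen
      else pvLoopB matrix f (pvValidNeighbors matrix n :: rest :: stk) (PySem.Set.add seen n)

def pvFuelB (matrix : List (List String)) : Nat := 12 * (matrix.length * (matrix.headD []).length) + 8

def get_cells_directions_alt (matrix : List (List String)) (start_point : Int × Int × String) : List (Int × Int × String) :=
  pvLoopB matrix (pvFuelB matrix) [pvValidNeighbors matrix start_point] (PySem.Set.ofList [start_point])

-- ===== PRECONDITION & SPEC =====
-- inside the grid (row 0's width, as A checks) and actually indexable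
def pvOk (matrix : List (List String)) (q : Int × Int × String) : Bool :=
  decide (0 ≤ q.1) && decide (q.1 < pvRows matrix) && decide (0 ≤ q.2.1) && decide (q.2.1 < pvWidth matrix) && (pvCell matrix q.1 q.2.1).isSome

def pvAllStates (matrix : List (List String)) : List (Int × Int × String) :=
  (List.range matrix.length).flatMap (fun r =>
    (List.range (matrix.headD []).length).flatMap (fun c =>
      (["up", "down", "left", "right"] : List String).map (fun d => (((r : Nat) : Int), ((c : Nat) : Int), d))))

-- Pre_ excludes the inputs on which A raises IndexError: an unindexable start, or a grid
-- in which a beam step out of an indexable in-grid cell (or out of the start) can enter a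
-- row shorter than row 0 (A's bounds check uses row 0's width only). The row-length clause
-- is a one-step closure condition, slightly conservative: on a few such ragged grids the
-- beam dies before reaching the short row and A still returns (see the cite in claim.json).
def Pre_get_cells_directions (matrix : List (List String)) (start_point : Int × Int × String) : Prop :=
  (pvCell matrix start_point.1 start_point.2.1).isSome = true
  ∧ (∀ q ∈ pvValidNeighbors matrix start_point, pvOk matrix q = true)
  ∧ (∀ p ∈ pvAllStates matrix, pvOk matrix p = true → ∀ q ∈ pvValidNeighbors matrix p, pvOk matrix q = true)

instance (matrix : List (List String)) (start_point : Int × Int × String) : Decidable (Pre_get_cells_directions matrix start_point) := by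
  unfold Pre_get_cells_directions; infer_instance

def pvWitness_get_cells_directions : List (List String) × (Int × Int × String) :=
  ([[".", "."]], (0, 0, "right"))

def Spec_get_cells_directions (matrix : List (List String)) (start_point : Int × Int × String) (out : List (Int × Int × String)) : Prop := out = get_cells_directions_alt matrix start_point
instance (matrix : List (List String)) (start_point : Int × Int × String) (out : List (Int × Int × String)) : Decidable (Spec_get_cells_directions matrix start_point out) := by unfold Spec_get_cells_directions; infer_instance

-- ===== CLAIM (what is proved, stated in full; the proofs are below) =====
def Claim_equal_get_cells_directions : Prop := ∀ (matrix : List (List String)) (start_point : Int × Int × String), Dom_get_cells_directions matrix start_point → Pre_get_cells_directions matrix start_point → Spec_get_cells_directions matrix start_point (get_cells_directions matrix start_point)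

-- ===== LEMMAS AND PROOFS =====

-- proof-only definitions and lemmas
def pvCap (matrix : List (List String)) : Nat := matrix.length * (matrix.headD []).length * 4 + 1
def pvGood (matrix : List (List String)) (q : Int × Int × String) : Prop :=
  pvOk matrix q = true ∧ (q.2.2 = "up" ∨ q.2.2 = "down" ∨ q.2.2 = "left" ∨ q.2.2 = "right")
def PvInv (matrix : List (List String)) (sp : Int × Int × String) (v : List (Int × Int × String)) : Prop :=
  v.Nodup ∧ ∀ q ∈ v, q = sp ∨ pvGood matrix q

theorem pv_dir_gn (val : String) (p : Int × Int) (d : String) (q : Int × Int × String)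
    (hq : q ∈ get_neighbors val p d) :
    q.2.2 = "up" ∨ q.2.2 = "down" ∨ q.2.2 = "left" ∨ q.2.2 = "right" := by
  unfold get_neighbors at hq
  split_ifs at hq <;> simp_all <;> (try rcases hq with h | h) <;> simp_all

theorem pv_len_gn (val : String) (p : Int × Int) (d : String) : (get_neighbors val p d).length ≤ 2 := by
  unfold get_neighbors; split_ifs <;> simp

theorem pv_mem_allStates (matrix : List (List String)) (q : Int × Int × String)
    (hg : pvGood matrix q) : q ∈ pvAllStates matrix := by
  obtain ⟨hok, hd⟩ := hg
  simp only [pvOk, pvRows, pvWidth, Bool.and_eq_true, decide_eq_true_eq] at hok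
  obtain ⟨⟨⟨⟨h1, h2⟩, h3⟩, h4⟩, _⟩ := hok
  simp only [pvAllStates, List.mem_flatMap, List.mem_range, List.mem_map]
  refine ⟨q.1.toNat, by omega, q.2.1.toNat, by omega, ?_⟩
  refine ⟨q.2.2, ?_, ?_⟩
  · rcases hd with h|h|h|h <;> simp [h]
  · obtain ⟨a, b, c⟩ := q; simp at h1 h3 ⊢; omega

theorem pv_length_allStates (matrix : List (List String)) :
    (pvAllStates matrix).length = matrix.length * (matrix.headD []).length * 4 := by
  simp [pvAllStates]
  ring

theorem pv_card (matrix : List (List String)) (sp : Int × Int × String)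
    (v : List (Int × Int × String)) (hv : PvInv matrix sp v) : v.length ≤ pvCap matrix := by
  obtain ⟨hnd, hmem⟩ := hv
  have hsub : v ⊆ sp :: pvAllStates matrix := by
    intro q hq
    rcases hmem q hq with h | h
    · simp [h]
    · exact List.mem_cons_of_mem _ (pv_mem_allStates matrix q h)
  have := (hnd.subperm hsub).length_le
  simpa [pv_length_allStates, pvCap, Nat.add_comm] using this

theorem pv_vn_eq (matrix : List (List String)) (p : Int × Int × String) (val : String)
    (hc : pvCell matrix p.1 p.2.1 = some val) :
    pvValidNeighbors matrix p = (get_neighbors val (p.1, p.2.1) p.2.2).filter (pvIsValid matrix) := by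
  unfold pvValidNeighbors
  rw [hc]
  apply List.filter_congr
  intro q _
  apply Bool.eq_iff_iff.mpr
  simp [pvIsValid]
  omega

theorem pv_len_vn (matrix : List (List String)) (p : Int × Int × String) :
    (pvValidNeighbors matrix p).length ≤ 2 := by
  unfold pvValidNeighbors
  cases h : pvCell matrix p.1 p.2.1 with
  | none => simp
  | some val => exact le_trans (List.length_filter_le _ _) (pv_len_gn _ _ _)

theorem pv_vn_good (matrix : List (List String)) (sp : Int × Int × String)
    (hPre : Pre_get_cells_directions matrix sp) (p : Int × Int × String)
    (hp : p = sp ∨ pvGood matrix p) :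
    ∀ q ∈ pvValidNeighbors matrix p, pvGood matrix q := by
  intro q hq
  have hok : pvOk matrix q = true := by
    rcases hp with h | h
    · subst h; exact hPre.2.1 q hq
    · exact hPre.2.2 p (pv_mem_allStates matrix p h) h.1 q hq
  refine ⟨hok, ?_⟩
  unfold pvValidNeighbors at hq
  rcases h : pvCell matrix p.1 p.2.1 with _ | val
  · rw [h] at hq; simp at hq
  · rw [h] at hq; exact pv_dir_gn _ _ _ _ (List.mem_filter.mp hq).1

theorem pv_inv_add (matrix : List (List String)) (sp : Int × Int × String)
    (v : List (Int × Int × String)) (n : Int × Int × String)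
    (hv : PvInv matrix sp v) (hn : pvGood matrix n) (hmem : ¬ n ∈ v) :
    PvInv matrix sp (PySem.Set.add v n) ∧ (PySem.Set.add v n).length = v.length + 1 ∧ v ⊆ PySem.Set.add v n ∧ n ∈ PySem.Set.add v n := by
  have hc : PySem.Set.contains v n = false := by
    rw [Bool.eq_false_iff]; intro h; exact hmem ((PySem.Set.contains_iff _ _).mp h)
  have he : PySem.Set.add v n = v ++ [n] := by simp [PySem.Set.add, hmem]
  rw [he]
  refine ⟨⟨?_, ?_⟩, by simp, List.subset_append_left _ _, by simp⟩
  · exact hv.1.append (List.nodup_singleton n) (by intro a ha hb; simp at hb; subst hb; exact hmem ha)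
  · intro q hq
    rcases List.mem_append.mp hq with h | h
    · exact hv.2 q h
    · simp at h; subst h; exact Or.inr hn

def PvDfsP (matrix : List (List String)) (sp : Int × Int × String) (f : Nat) : Prop :=
  ∀ p v t, PvInv matrix sp v → t ⊆ v → p ∈ v → (p = sp ∨ pvGood matrix p) →
      v ⊆ (pvDfsA matrix f p v t).1 ∧ PvInv matrix sp (pvDfsA matrix f p v t).1 ∧ (pvDfsA matrix f p v t).2 ⊆ (pvDfsA matrix f p v t).1

def PvGoP (matrix : List (List String)) (sp : Int × Int × String) (f : Nat) : Prop :=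
  ∀ ns v t, PvInv matrix sp v → t ⊆ v → (∀ q ∈ ns, pvGood matrix q) →
      v ⊆ (pvGoA matrix f ns v t).1 ∧ PvInv matrix sp (pvGoA matrix f ns v t).1 ∧ (pvGoA matrix f ns v t).2 ⊆ (pvGoA matrix f ns v t).1

theorem pv_presGo (matrix : List (List String)) (sp : Int × Int × String)
    (f : Nat) (hdfs : PvDfsP matrix sp f) : PvGoP matrix sp f := by
  intro ns
  induction ns with
  | nil => intro v t hv ht _; simp only [pvGoA]; exact ⟨List.Subset.refl _, hv, ht⟩
  | cons n rest ih =>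
    intro v t hv ht hns
    by_cases hmem : n ∈ v
    · have hc : PySem.Set.contains v n = true := (PySem.Set.contains_iff _ _).mpr hmem
      simp only [pvGoA, hc, if_true]
      exact ih v t hv ht (fun q hq => hns q (List.mem_cons_of_mem _ hq))
    · have hc : PySem.Set.contains v n = false := by
        rw [Bool.eq_false_iff]; intro h; exact hmem ((PySem.Set.contains_iff _ _).mp h)
      simp only [pvGoA, hc, Bool.false_eq_true, if_false]
      have hgood := hns n List.mem_cons_self
      obtain ⟨hv', hlen, hsub, hmem'⟩ := pv_inv_add matrix sp v n hv hgood hmem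
      have hd := hdfs n (PySem.Set.add v n) t hv' (ht.trans hsub) hmem' (Or.inr hgood)
      have hg := ih (pvDfsA matrix f n (PySem.Set.add v n) t).1 (pvDfsA matrix f n (PySem.Set.add v n) t).2
        hd.2.1 hd.2.2 (fun q hq => hns q (List.mem_cons_of_mem _ hq))
      exact ⟨(hsub.trans hd.1).trans hg.1, hg.2.1, hg.2.2⟩

theorem pv_presA (matrix : List (List String)) (sp : Int × Int × String)
    (hPre : Pre_get_cells_directions matrix sp) : ∀ f : Nat,
    PvDfsP matrix sp f ∧ PvGoP matrix sp f := by
  intro f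
  induction f with
  | zero =>
    have hdfs : PvDfsP matrix sp 0 := by
      intro p v t hv ht hpv hp
      simp only [pvDfsA]
      exact ⟨List.Subset.refl _, hv, ht⟩
    exact ⟨hdfs, pv_presGo matrix sp 0 hdfs⟩
  | succ f ih =>
    have hdfs : PvDfsP matrix sp (f+1) := by
      intro p v t hv ht hpv hp
      simp only [pvDfsA]
      by_cases hct : PySem.Set.contains t p = true
      · simp only [hct, if_true]; exact ⟨List.Subset.refl _, hv, ht⟩
      · simp only [hct]
        rcases hcell : pvCell matrix p.1 p.2.1 with _ | val
        · exact ⟨List.Subset.refl _, hv, ht⟩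
        · have hns : ∀ q ∈ (get_neighbors val (p.1, p.2.1) p.2.2).filter (pvIsValid matrix), pvGood matrix q := by
            rw [← pv_vn_eq matrix p val hcell]
            exact pv_vn_good matrix sp hPre p hp
          have hg := ih.2 ((get_neighbors val (p.1, p.2.1) p.2.2).filter (pvIsValid matrix)) v t hv ht hns
          refine ⟨hg.1, hg.2.1, ?_⟩
          intro q hq
          rcases (PySem.Set.mem_add _ _ _).mp hq with h | h
          · exact hg.2.2 h
          · subst h; exact hg.1 hpv
    exact ⟨hdfs, pv_presGo matrix sp (f+1) hdfs⟩

def pvPhi (matrix : List (List String)) (stk : List (List (Int × Int × String))) (v : List (Int × Int × String)) : Nat :=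
  (stk.map List.length).sum + stk.length + 3 * (pvCap matrix - v.length)

theorem pv_phi_cons (matrix : List (List String)) (fr : List (Int × Int × String))
    (stk : List (List (Int × Int × String))) (v : List (Int × Int × String)) :
    pvPhi matrix (fr :: stk) v = fr.length + pvPhi matrix stk v + 1 := by
  simp [pvPhi]; ring

theorem pv_loopstep (matrix : List (List String)) (sp : Int × Int × String)
    (hPre : Pre_get_cells_directions matrix sp) : ∀ f : Nat, ∀ stk v,
    PvInv matrix sp v → (∀ fr ∈ stk, ∀ q ∈ fr, pvGood matrix q) → pvPhi matrix stk v ≤ f →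
    pvLoopB matrix f stk v = pvLoopB matrix (f+1) stk v := by
  intro f
  induction f with
  | zero =>
    intro stk v hv hstk hphi
    cases stk with
    | nil => rfl
    | cons fr stk' => rw [pv_phi_cons] at hphi; omega
  | succ f ih =>
    intro stk v hv hstk hphi
    cases stk with
    | nil => rfl
    | cons fr stk' =>
      cases fr with
      | nil =>
        simp only [pvLoopB]
        exact ih stk' v hv (fun fr h => hstk fr (List.mem_cons_of_mem _ h)) (by rw [pv_phi_cons] at hphi; omega)
      | cons n rest =>
        by_cases hmem : n ∈ v
        · have hc : PySem.Set.contains v n = true := (PySem.Set.contains_iff _ _).mpr hmem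
          simp only [pvLoopB, hc, if_true]
          refine ih (rest :: stk') v hv ?_ ?_
          · intro fr h q hq
            rcases List.mem_cons.mp h with h' | h'
            · exact hstk (n::rest) List.mem_cons_self q (by rw [h'] at hq; exact List.mem_cons_of_mem _ hq)
            · exact hstk fr (List.mem_cons_of_mem _ h') q hq
          · simp only [pvPhi, List.map_cons, List.sum_cons, List.length_cons] at hphi ⊢; omega
        · have hc : PySem.Set.contains v n = false := by
            rw [Bool.eq_false_iff]; intro h; exact hmem ((PySem.Set.contains_iff _ _).mp h)
          simp only [pvLoopB, hc, Bool.false_eq_true, if_false]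
          have hgood : pvGood matrix n := hstk (n::rest) List.mem_cons_self n List.mem_cons_self
          obtain ⟨hv', hlen, hsub, hmem'⟩ := pv_inv_add matrix sp v n hv hgood hmem
          have hcap : (PySem.Set.add v n).length ≤ pvCap matrix := pv_card matrix sp _ hv'
          have hvn : (pvValidNeighbors matrix n).length ≤ 2 := pv_len_vn matrix n
          refine ih (pvValidNeighbors matrix n :: rest :: stk') (PySem.Set.add v n) hv' ?_ ?_
          · intro fr h q hq
            rcases List.mem_cons.mp h with h' | h'
            · exact pv_vn_good matrix sp hPre n (Or.inr hgood) q (by rw [h'] at hq; exact hq)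
            · rcases List.mem_cons.mp h' with h'' | h''
              · exact hstk (n::rest) List.mem_cons_self q (by rw [h''] at hq; exact List.mem_cons_of_mem _ hq)
              · exact hstk fr (List.mem_cons_of_mem _ h'') q hq
          · simp only [pvPhi, List.map_cons, List.sum_cons, List.length_cons] at hphi ⊢; omega

theorem pv_loop_fuel_mono (matrix : List (List String)) (sp : Int × Int × String)
    (hPre : Pre_get_cells_directions matrix sp) (stk : List (List (Int × Int × String))) (v : List (Int × Int × String))
    (hv : PvInv matrix sp v) (hstk : ∀ fr ∈ stk, ∀ q ∈ fr, pvGood matrix q)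
    (f : Nat) (hf : pvPhi matrix stk v ≤ f) : ∀ k : Nat,
    pvLoopB matrix f stk v = pvLoopB matrix (f + k) stk v := by
  intro k
  induction k with
  | zero => rfl
  | succ k ih =>
    rw [ih, show f+(k+1) = (f+k)+1 by omega]
    exact pv_loopstep matrix sp hPre (f+k) stk v hv hstk (by omega)

theorem pv_loop_fuel_eq (matrix : List (List String)) (sp : Int × Int × String)
    (hPre : Pre_get_cells_directions matrix sp) (stk : List (List (Int × Int × String))) (v : List (Int × Int × String))
    (hv : PvInv matrix sp v) (hstk : ∀ fr ∈ stk, ∀ q ∈ fr, pvGood matrix q)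
    (f g : Nat) (hf : pvPhi matrix stk v ≤ f) (hg : pvPhi matrix stk v ≤ g) :
    pvLoopB matrix f stk v = pvLoopB matrix g stk v := by
  rcases Nat.le_total f g with h | h
  · rw [show g = f + (g - f) by omega]; exact pv_loop_fuel_mono matrix sp hPre stk v hv hstk f hf _
  · rw [show f = g + (f - g) by omega]; exact (pv_loop_fuel_mono matrix sp hPre stk v hv hstk g hg _).symm

theorem pv_loop_nil (matrix : List (List String)) (f : Nat) (v : List (Int × Int × String)) :
    pvLoopB matrix f [] v = v := by
  cases f <;> rfl

theorem pv_main (matrix : List (List String)) (sp : Int × Int × String)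
    (hPre : Pre_get_cells_directions matrix sp) : ∀ c : Nat, ∀ ns : List (Int × Int × String),
    ∀ (f g g₂ : Nat) (stk : List (List (Int × Int × String))) (v t : List (Int × Int × String)),
    pvCap matrix - v.length ≤ c →
    PvInv matrix sp v → t ⊆ v → (∀ q ∈ ns, pvGood matrix q) →
    (∀ fr ∈ stk, ∀ q ∈ fr, pvGood matrix q) →
    pvCap matrix ≤ f + v.length →
    pvPhi matrix (ns :: stk) v ≤ g →
    pvPhi matrix stk (pvGoA matrix f ns v t).1 ≤ g₂ →
    pvLoopB matrix g (ns :: stk) v = pvLoopB matrix g₂ stk (pvGoA matrix f ns v t).1 := by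
  intro c
  induction c using Nat.strong_induction_on with
  | _ c IH =>
    intro ns
    induction ns with
    | nil =>
      intro f g g₂ stk v t hc hv ht hns hstk hf hg hg₂
      simp only [pvGoA] at hg₂ ⊢
      obtain ⟨g', rfl⟩ : ∃ g', g = g'+1 := ⟨g-1, by rw [pv_phi_cons] at hg; omega⟩
      simp only [pvLoopB]
      exact pv_loop_fuel_eq matrix sp hPre stk v hv hstk g' g₂ (by rw [pv_phi_cons] at hg; omega) hg₂
    | cons n rest ih =>
      intro f g g₂ stk v t hc hv ht hns hstk hf hg hg₂
      obtain ⟨g', rfl⟩ : ∃ g', g = g'+1 := ⟨g-1, by rw [pv_phi_cons] at hg; omega⟩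
      by_cases hmem : n ∈ v
      · have hcv : PySem.Set.contains v n = true := (PySem.Set.contains_iff _ _).mpr hmem
        simp only [pvGoA, hcv, if_true] at hg₂ ⊢
        simp only [pvLoopB, hcv, if_true]
        refine ih f g' g₂ stk v t hc hv ht (fun q hq => hns q (List.mem_cons_of_mem _ hq)) hstk hf ?_ hg₂
        simp only [pvPhi, List.map_cons, List.sum_cons, List.length_cons] at hg ⊢; omega
      · have hcv : PySem.Set.contains v n = false := by
          rw [Bool.eq_false_iff]; intro h; exact hmem ((PySem.Set.contains_iff _ _).mp h)
        have hgood : pvGood matrix n := hns n List.mem_cons_self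
        obtain ⟨hv', hlen, hsub, hmem'⟩ := pv_inv_add matrix sp v n hv hgood hmem
        have hcap : (PySem.Set.add v n).length ≤ pvCap matrix := pv_card matrix sp _ hv'
        obtain ⟨f', rfl⟩ : ∃ f', f = f'+1 := ⟨f-1, by omega⟩
        -- reduce the A side: dfs on n
        have hct : PySem.Set.contains t n = false := by
          rw [Bool.eq_false_iff]; intro h; exact hmem (ht ((PySem.Set.contains_iff _ _).mp h))
        obtain ⟨val, hcell⟩ : ∃ val, pvCell matrix n.1 n.2.1 = some val := by
          have := hgood.1
          simp only [pvOk, Bool.and_eq_true] at this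
          exact Option.isSome_iff_exists.mp this.2
        have hdfseq : pvDfsA matrix (f'+1) n (PySem.Set.add v n) t
            = ((pvGoA matrix f' (pvValidNeighbors matrix n) (PySem.Set.add v n) t).1,
               PySem.Set.add (pvGoA matrix f' (pvValidNeighbors matrix n) (PySem.Set.add v n) t).2 n) := by
          simp only [pvDfsA, hct, Bool.false_eq_true, if_false, hcell]
          rw [← pv_vn_eq matrix n val hcell]
        have hgoeq : pvGoA matrix (f'+1) (n :: rest) v t
            = pvGoA matrix (f'+1) rest
                (pvGoA matrix f' (pvValidNeighbors matrix n) (PySem.Set.add v n) t).1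
                (PySem.Set.add (pvGoA matrix f' (pvValidNeighbors matrix n) (PySem.Set.add v n) t).2 n) := by
          simp only [pvGoA, hcv, Bool.false_eq_true, if_false, hdfseq]
        set R := pvGoA matrix f' (pvValidNeighbors matrix n) (PySem.Set.add v n) t with hR
        have hpres := (pv_presA matrix sp hPre f').2 (pvValidNeighbors matrix n) (PySem.Set.add v n) t
          hv' (ht.trans hsub) (pv_vn_good matrix sp hPre n (Or.inr hgood))
        have hlenR : (PySem.Set.add v n).length ≤ R.1.length := (hv'.1.subperm hpres.1).length_le
        have hgood_rest : ∀ q ∈ rest, pvGood matrix q := fun q hq => hns q (List.mem_cons_of_mem _ hq)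
        -- LHS step
        simp only [pvLoopB, hcv, Bool.false_eq_true, if_false]
        -- IH₁
        have h1 := IH (pvCap matrix - (PySem.Set.add v n).length) (by omega)
          (pvValidNeighbors matrix n) f' g' (pvPhi matrix (rest :: stk) R.1) (rest :: stk)
          (PySem.Set.add v n) t (le_refl _) hv' (ht.trans hsub)
          (pv_vn_good matrix sp hPre n (Or.inr hgood))
          (by
            intro fr h q hq
            rcases List.mem_cons.mp h with h' | h'
            · exact hgood_rest q (by rw [h'] at hq; exact hq)
            · exact hstk fr h' q hq)
          (by omega)
          (by
            have hvn : (pvValidNeighbors matrix n).length ≤ 2 := pv_len_vn matrix n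
            simp only [pvPhi, List.map_cons, List.sum_cons, List.length_cons] at hg ⊢; omega)
          (le_refl _)
        rw [h1]
        -- IH₂
        have h2 := IH (pvCap matrix - R.1.length) (by omega)
          rest (f'+1) (pvPhi matrix (rest :: stk) R.1) g₂ stk R.1 (PySem.Set.add R.2 n)
          (le_refl _) hpres.2.1
          (by
            intro q hq
            rcases (PySem.Set.mem_add _ _ _).mp hq with h | h
            · exact hpres.2.2 h
            · subst h; exact hpres.1 hmem')
          hgood_rest hstk (by omega) (le_refl _)
          (by rw [hgoeq] at hg₂; exact hg₂)
        rw [h2, ← hgoeq]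

-- ===== VERDICT (by name: the statement is the Claim_ definition above) =====
theorem get_cells_directions_spec : Claim_equal_get_cells_directions := by
  intro matrix sp hDom hPre
  unfold Spec_get_cells_directions get_cells_directions get_cells_directions_alt
  have hof : (PySem.Set.ofList [sp] : List (Int × Int × String)) = [sp] :=
    PySem.Set.ofList_eq_self_of_nodup _ (List.nodup_singleton _)
  rw [hof]
  obtain ⟨val, hcell⟩ := Option.isSome_iff_exists.mp hPre.1
  have hfa : pvFuelA matrix = pvCap matrix + 1 := by simp [pvFuelA, pvCap]
  rw [hfa]
  have hct : PySem.Set.contains (PySem.Set.empty : List (Int × Int × String)) sp = false := rfl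
  have hdfseq : pvDfsA matrix (pvCap matrix + 1) sp [sp] PySem.Set.empty
      = ((pvGoA matrix (pvCap matrix) (pvValidNeighbors matrix sp) [sp] PySem.Set.empty).1,
         PySem.Set.add (pvGoA matrix (pvCap matrix) (pvValidNeighbors matrix sp) [sp] PySem.Set.empty).2 sp) := by
    simp only [pvDfsA, hct, Bool.false_eq_true, if_false, hcell]
    rw [← pv_vn_eq matrix sp val hcell]
  rw [hdfseq]
  have hinv : PvInv matrix sp [sp] := by
    refine ⟨List.nodup_singleton _, ?_⟩
    intro q hq; simp at hq; subst hq; exact Or.inl rfl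
  have hmain := pv_main matrix sp hPre (pvCap matrix)
    (pvValidNeighbors matrix sp) (pvCap matrix) (pvFuelB matrix)
    (pvPhi matrix [] (pvGoA matrix (pvCap matrix) (pvValidNeighbors matrix sp) [sp] PySem.Set.empty).1)
    [] [sp] PySem.Set.empty
    (by simp)
    hinv (List.nil_subset _)
    (pv_vn_good matrix sp hPre sp (Or.inl rfl))
    (by intro fr h; exact absurd h (List.not_mem_nil))
    (by simp [pvCap])
    (by
      have hvn : (pvValidNeighbors matrix sp).length ≤ 2 := pv_len_vn matrix sp
      simp only [pvPhi, pvCap, pvFuelB, List.map_cons, List.sum_cons, List.map_nil,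
        List.sum_nil, List.length_cons, List.length_nil]
      omega)
    (le_refl _)
  rw [pv_loop_nil] at hmain
  exact hmain.symm
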